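-- pv_equiv track=rewrite | github.com/malvidin/sunburst_decode | bin/sunburst.py | decode_guid
-- ===== SOURCE A (Python) =====
-- def custom_base32decode(input_string, rt=True, bits_on_stack=0, bit_stack=0):
--     text = 'ph2eifo3n5utg1j8d94qrvbmk0sal76c'
--     ret_bytes = b''
--     for ch in input_string:
--         bit_stack |= text.find(ch) << bits_on_stack
--         bits_on_stack += 5
--         if bits_on_stack >= 8:
--             ret_bytes += bytes(bytearray([bit_stack & 255]))
--             bit_stack >>= 8
--             bits_on_stack -= 8
--     if bits_on_stack > 0 and bit_stack > 0:
--         if rt: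
--             ret_bytes += ' (0b{:06b}, {})'.format(bit_stack & 255, bits_on_stack).encode()
--     return bytearray(ret_bytes)
--
-- def decode_guid(input_string):
--     ret_string = ''
--     decoded = custom_base32decode(input_string)
--     xor_key = decoded[0]
--     encoded_guid = decoded[1:]
--     for b in encoded_guid:
--         ret_string += '{:02X}'.format(b ^ xor_key)
--     return ret_string
-- ===== SOURCE B (Python) =====
-- def decode_guid(input_string):
--     text = 'ph2eifo3n5utg1j8d94qrvbmk0sal76c'
--     # phase 1: fold every 5-bit group into one big little-endian accumulator
--     acc = 0
--     for pos, ch in enumerate(input_string):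
--         acc |= text.find(ch) << (5 * pos)
--     nbits = 5 * len(input_string)
--     nbytes = nbits // 8
--     rem = nbits % 8
--     # phase 2: peel whole bytes off the accumulator, LSB first
--     data = []
--     t = acc
--     for _ in range(nbytes):
--         data.append(t & 255)
--         t >>= 8
--     if rem > 0 and t > 0:
--         data.extend(' (0b{:06b}, {})'.format(t & 255, rem).encode())
--     key = data[0]
--     return ''.join('{:02X}'.format(b ^ key) for b in data[1:])
-- ===== Notes on version B (the rewrite author's own statement) =====
-- stated objective: alternative
-- what changed: B replaces A's interleaved decode loop (emit a byte whenever 8 bits are buffered, shifting the buffer down) by a two-phase collect-then-reconstruct pass: it first ORs all 5-bit groups into one big little-endian integer accumulator, then peels whole bytes off that integer LSB-first, appends the trailing-bits marker from the remaining value, and XOR/hex-formats in one final pass.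
import Mathlib
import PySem

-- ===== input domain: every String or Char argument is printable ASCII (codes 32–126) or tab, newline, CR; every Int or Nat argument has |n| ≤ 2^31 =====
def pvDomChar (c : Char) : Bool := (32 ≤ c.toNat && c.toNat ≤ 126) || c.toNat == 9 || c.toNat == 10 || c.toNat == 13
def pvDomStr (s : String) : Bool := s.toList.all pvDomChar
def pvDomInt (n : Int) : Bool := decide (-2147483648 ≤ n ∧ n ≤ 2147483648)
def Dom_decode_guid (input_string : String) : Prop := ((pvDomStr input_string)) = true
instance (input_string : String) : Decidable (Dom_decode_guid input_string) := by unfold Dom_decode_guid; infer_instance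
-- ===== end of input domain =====

-- B re-decodes by collecting all 5-bit groups into one big integer accumulator and then
-- peeling bytes off it, instead of A's interleaved emit-while-decoding loop.

-- helpers shared by both ports (both Pythons contain these identical sub-expressions)
def pvText : List Char := "ph2eifo3n5utg1j8d94qrvbmk0sal76c".toList

-- text.find(ch) for a one-character needle
def pvIdx (c : Char) : Int := PySem.Chars.find pvText [c]

-- ' (0b{:06b}, {})'.format(v, bits).encode(); exact for 0 ≤ v (the only use is v = x & 255)
def pvTrail (v : Int) (bits : Nat) : List Int :=
  ((" (0b".toList ++ (List.replicate (6 - (PySem.Int.toBinChars v).length) '0'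
      ++ PySem.Int.toBinChars v) ++ ", ".toList ++ PySem.Int.toChars (bits : Int) ++ [')']).map
    (fun c => (c.toNat : Int)))

-- '{:02X}'.format(v); exact for 0 ≤ v < 256 (the only use: XOR of two bytes)
def pvHex2 (v : Int) : List Char :=
  ["0123456789ABCDEF".toList.getD (v.toNat / 16) '0',
   "0123456789ABCDEF".toList.getD (v.toNat % 16) '0']

-- ===== PORT A =====
-- one iteration of A's for-loop: state = (ret_bytes, bit_stack, bits_on_stack)
def pvStepA (st : List Int × Int × Nat) (ch : Char) : List Int × Int × Nat :=
  let bs := PySem.Int.bor st.2.1 (pvIdx ch <<< st.2.2)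
  let bits := st.2.2 + 5
  if 8 ≤ bits then (st.1 ++ [PySem.Int.band bs 255], bs >>> (8:Nat), bits - 8)
  else (st.1, bs, bits)

-- custom_base32decode(input_string) with the default arguments decode_guid passes (rt=True)
def pvB32 (s : String) : List Int :=
  let st := s.toList.foldl pvStepA ([], 0, 0)
  if 0 < st.2.2 ∧ 0 < st.2.1 then st.1 ++ pvTrail (PySem.Int.band st.2.1 255) st.2.2
  else st.1

def decode_guid (input_string : String) : String :=
  let decoded := pvB32 input_string
  -- decoded[0]: IndexError on an empty bytearray — excluded by Pre_decode_guid
  let xor_key := PySem.List.pyGetD decoded 0 0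
  let encoded_guid := PySem.List.slice decoded (some 1) none
  String.ofList (encoded_guid.foldl (fun acc b => acc ++ pvHex2 (PySem.Int.bxor b xor_key)) [])

-- ===== PORT B =====
-- phase 1 of Source B: acc |= text.find(ch) << (5*pos); state = (acc, pos)
def pvAccStep (st : Int × Nat) (ch : Char) : Int × Nat :=
  (PySem.Int.bor st.1 (pvIdx ch <<< (5 * st.2)), st.2 + 1)

-- phase 2 of Source B: data.append(t & 255); t >>= 8; state = (data, t)
def pvPeelStep (st : List Int × Int) (_ : Nat) : List Int × Int :=
  (st.1 ++ [PySem.Int.band st.2 255], st.2 >>> (8:Nat))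

def decode_guid_alt (input_string : String) : String :=
  let acc := (input_string.toList.foldl pvAccStep (0, 0)).1
  let nbits := 5 * input_string.toList.length
  let nbytes := nbits / 8
  let rem := nbits % 8
  let p := (List.range nbytes).foldl pvPeelStep ([], acc)
  let data := if 0 < rem ∧ 0 < p.2 then p.1 ++ pvTrail (PySem.Int.band p.2 255) rem else p.1
  -- data[0]: IndexError on empty data — excluded by Pre_decode_guid
  let key := PySem.List.pyGetD data 0 0
  String.ofList (((PySem.List.slice data (some 1) none).map
    (fun b => pvHex2 (PySem.Int.bxor b key))).flatten)

-- ===== PRECONDITION & SPEC =====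
-- Pre_ is exactly where Python A returns: custom_base32decode gives a nonempty bytearray,
-- i.e. at least two characters, or a single character whose alphabet index is positive
-- (otherwise decoded[0] raises IndexError; Python B raises on exactly the same inputs).
def Pre_decode_guid (input_string : String) : Prop :=
  2 ≤ input_string.toList.length ∨
    (input_string.toList.length = 1 ∧
      input_string.toList.headD 'p' ∈ "h2eifo3n5utg1j8d94qrvbmk0sal76c".toList)
instance (input_string : String) : Decidable (Pre_decode_guid input_string) := by
  unfold Pre_decode_guid; infer_instance

def pvWitness_decode_guid : String := "rq"

def Spec_decode_guid (input_string : String) (out : String) : Prop := out = decode_guid_alt input_string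
instance (input_string : String) (out : String) : Decidable (Spec_decode_guid input_string out) := by
  unfold Spec_decode_guid; infer_instance

-- ===== CLAIM (what is proved, stated in full; the proofs are below) =====
def Claim_equal_decode_guid : Prop := ∀ (input_string : String), Dom_decode_guid input_string → Pre_decode_guid input_string → Spec_decode_guid input_string (decode_guid input_string)

-- ===== LEMMAS AND PROOFS =====

-- proof-side abbreviations
def pvAcc (cs : List Char) : Int := (cs.foldl pvAccStep (0, 0)).1
def pvPeelN (n : Nat) (t : Int) : List Int × Int := (List.range n).foldl pvPeelStep ([], t)

lemma pv_shl_eq (a : Int) (k : Nat) : a <<< k = a * 2 ^ k := by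
  simp [Int.shiftLeft_eq]

lemma pv_shr_eq (a : Int) (k : Nat) : a >>> k = a / 2 ^ k := by
  rw [Int.shiftRight_eq_div_pow]; norm_cast

lemma pv_band255 (a : Int) : PySem.Int.band a 255 = a % 256 := by
  rcases le_or_gt 0 a with h | h
  · rw [PySem.Int.band_of_nonneg h (by norm_num)]
    have h255 : (255 : Int).toNat = 2 ^ 8 - 1 := rfl
    rw [h255, Nat.and_two_pow_sub_one_eq_mod]
    omega
  · rw [PySem.Int.band.eq_1]
    have h1 : ¬ (0 ≤ a) := by omega
    have h2 : (0 : Int) ≤ 255 := by norm_num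
    simp only [h1, h2, if_true, if_false]
    have h255 : (255 : Int).toNat = 2 ^ 8 - 1 := rfl
    rw [h255, Nat.land_comm, Nat.and_two_pow_sub_one_eq_mod]
    have hm : ((-a - 1).toNat : Int) = -a - 1 := by omega
    have hlt : (-a - 1).toNat % 2 ^ 8 < 2 ^ 8 := Nat.mod_lt _ (by norm_num)
    have hmod : (((-a - 1).toNat % 2 ^ 8 : Nat) : Int) = (((-a - 1).toNat : Int)) % 256 := by
      push_cast
      norm_num
    omega

lemma pv_nat_and_shl_zero (x y k : Nat) (h : x < 2 ^ k) : x &&& (y <<< k) = 0 := by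
  apply Nat.eq_of_testBit_eq; intro i
  simp only [Nat.testBit_land, Nat.testBit_shiftLeft, Nat.zero_testBit, Bool.and_eq_false_iff]
  by_cases hi : k ≤ i
  · left
    exact Nat.testBit_lt_two_pow (lt_of_lt_of_le h (Nat.pow_le_pow_right (by norm_num) hi))
  · right; simp [hi]

lemma pv_nat_or_add (x y k : Nat) (h : x < 2 ^ k) : x ||| (y <<< k) = x + 2 ^ k * y := by
  apply Nat.eq_of_testBit_eq; intro i
  have hadd : x + 2 ^ k * y = 2 ^ k * y + x := by ring
  rw [hadd, Nat.testBit_two_pow_mul_add y h i]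
  simp only [Nat.testBit_lor, Nat.testBit_shiftLeft]
  by_cases hi : i < k
  · simp [hi, Nat.not_le.mpr hi]
  · have hk : k ≤ i := Nat.le_of_not_lt hi
    have hx : x.testBit i = false :=
      Nat.testBit_lt_two_pow (lt_of_lt_of_le h (Nat.pow_le_pow_right (by norm_num) hk))
    simp [hi, hk, hx]

lemma pv_toNat_shl (v : Int) (k : Nat) (hvp : 0 ≤ v) : (v <<< k).toNat = v.toNat <<< k := by
  rw [pv_shl_eq, Nat.shiftLeft_eq]
  have h : v * 2 ^ k = ((v.toNat * 2 ^ k : Nat) : Int) := by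
    push_cast [Int.toNat_of_nonneg hvp]; ring
  rw [h, Int.toNat_natCast]

lemma pv_bor_pos (a v : Int) (k : Nat) (h0 : 0 ≤ a) (h1 : a < 2 ^ k) (hv : -1 ≤ v) :
    PySem.Int.bor a (v <<< k) = a + v * 2 ^ k := by
  have hp : (0:Int) < 2 ^ k := pow_pos (by norm_num) k
  have hcast : ((2:Int) ^ k) = ((2 ^ k : Nat) : Int) := by push_cast; ring
  have hna : a.toNat < 2 ^ k := by omega
  rcases le_or_gt 0 v with hvp | hvn
  · -- v ≥ 0 : disjoint nonnegative OR is addition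
    have hb : (0 : Int) ≤ v <<< k := by
      rw [pv_shl_eq]; positivity
    rw [PySem.Int.bor_of_nonneg h0 hb]
    rw [pv_toNat_shl v k hvp, pv_nat_or_add a.toNat v.toNat k hna]
    push_cast
    rw [Int.toNat_of_nonneg h0, Int.toNat_of_nonneg hvp]
    ring
  · -- v = -1 : OR with all-ones above bit k subtracts 2^k
    have hv1 : v = -1 := by omega
    subst hv1
    have hb : (-1 : Int) <<< k = -(2 ^ k) := by rw [pv_shl_eq]; ring
    rw [hb, PySem.Int.bor.eq_1]
    have hbn : ¬ ((0:Int) ≤ -(2 ^ k)) := by omega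
    simp only [h0, hbn, if_true, if_false]
    have hm : (-(-(2 ^ k : Int)) - 1).toNat = 2 ^ k - 1 := by omega
    rw [hm]
    have hand : (2 ^ k - 1) &&& a.toNat = a.toNat := by
      rw [Nat.land_comm, Nat.and_two_pow_sub_one_eq_mod]
      exact Nat.mod_eq_of_lt hna
    rw [hand]
    omega

lemma pv_bor_neg (a v : Int) (k : Nat) (h0 : a < 0) (h1 : -(2 ^ k) ≤ a) (hv : -1 ≤ v) :
    PySem.Int.bor a (v <<< k) = a := by
  have hp : (0:Int) < 2 ^ k := pow_pos (by norm_num) k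
  have hcast : ((2:Int) ^ k) = ((2 ^ k : Nat) : Int) := by push_cast; ring
  have hm : (-a - 1).toNat < 2 ^ k := by omega
  rcases le_or_gt 0 v with hvp | hvn
  · have hb : (0 : Int) ≤ v <<< k := by rw [pv_shl_eq]; positivity
    rw [PySem.Int.bor.eq_1]
    have h0' : ¬ ((0:Int) ≤ a) := by omega
    simp only [h0', hb, if_true, if_false]
    rw [pv_toNat_shl v k hvp, pv_nat_and_shl_zero _ _ _ hm]
    omega
  · have hv1 : v = -1 := by omega
    subst hv1
    have hb : (-1 : Int) <<< k = -(2 ^ k) := by rw [pv_shl_eq]; ring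
    rw [hb, PySem.Int.bor.eq_1]
    have h0' : ¬ ((0:Int) ≤ a) := by omega
    have hbn : ¬ ((0:Int) ≤ -(2 ^ k : Int)) := by omega
    simp only [h0', hbn, if_false]
    have hmm : (-(-(2 ^ k : Int)) - 1).toNat = 2 ^ k - 1 := by omega
    rw [hmm]
    have hand : (-a - 1).toNat &&& (2 ^ k - 1) = (-a - 1).toNat := by
      rw [Nat.and_two_pow_sub_one_eq_mod]
      exact Nat.mod_eq_of_lt hm
    rw [hand]
    omega

lemma pv_idx_lb (c : Char) : -1 ≤ pvIdx c := PySem.Chars.neg_one_le_find _ _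

lemma pv_idx_ub (c : Char) : pvIdx c < 32 := by
  have hle : pvIdx c ≤ 32 := by
    have := PySem.Chars.find_le_length pvText [c]
    simpa [pvText] using this
  rcases lt_or_eq_of_le hle with h | h
  · exact h
  · exfalso
    have hnn : 0 ≤ PySem.Chars.find pvText [c] := by rw [show PySem.Chars.find pvText [c] = pvIdx c from rfl, h]; norm_num
    have hspec := (PySem.Chars.find_spec hnn).1
    rw [show PySem.Chars.find pvText [c] = pvIdx c from rfl, h] at hspec
    simp [pvText] at hspec

lemma pv_peel_succ (n : Nat) (t : Int) :
    pvPeelN (n + 1) t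
      = ((pvPeelN n t).1 ++ [PySem.Int.band (pvPeelN n t).2 255], (pvPeelN n t).2 >>> (8:Nat)) := by
  unfold pvPeelN
  rw [List.range_succ, List.foldl_append]
  rfl

lemma pv_peel_snd (n : Nat) (t : Int) : (pvPeelN n t).2 = t / 2 ^ (8 * n) := by
  induction n with
  | zero => simp [pvPeelN]
  | succ m ih =>
    have h256 : ((2:Int) ^ (8:Nat)) = 256 := by norm_num
    rw [pv_peel_succ, ih, pv_shr_eq, h256,
      Int.ediv_ediv_of_nonneg (by positivity : (0:Int) ≤ 2 ^ (8 * m))]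
    rw [show (256:Int) = 2 ^ (8:Nat) from by norm_num, ← pow_add,
      show 8 * m + 8 = 8 * (m + 1) from by omega]

lemma pv_peel_stable (n : Nat) (t c : Int) (m : Nat) (h : 8 * n ≤ m) :
    pvPeelN n (t + c * 2 ^ m) = ((pvPeelN n t).1, (pvPeelN n t).2 + c * 2 ^ (m - 8 * n)) := by
  induction n generalizing t with
  | zero => simp [pvPeelN]
  | succ q ih =>
    have hq : 8 * q ≤ m := by omega
    rw [pv_peel_succ, pv_peel_succ, ih _ hq]
    have h256 : ((2:Int) ^ (8:Nat)) = 256 := by norm_num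
    have hex : (2:Int) ^ (m - 8 * q) = 2 ^ (m - 8 * (q + 1)) * (256 : Int) := by
      rw [show (256:Int) = 2 ^ (8:Nat) from by norm_num, ← pow_add]
      congr 1
      omega
    have hsplit : c * 2 ^ (m - 8 * q) = 256 * (c * 2 ^ (m - 8 * (q + 1))) := by
      rw [hex]; ring
    have hband : PySem.Int.band ((pvPeelN q t).2 + c * 2 ^ (m - 8 * q)) 255
        = PySem.Int.band (pvPeelN q t).2 255 := by
      rw [pv_band255, pv_band255, hsplit, Int.add_mul_emod_self_left]
    have hshr : ((pvPeelN q t).2 + c * 2 ^ (m - 8 * q)) >>> (8:Nat)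
        = (pvPeelN q t).2 >>> (8:Nat) + c * 2 ^ (m - 8 * (q + 1)) := by
      rw [pv_shr_eq, pv_shr_eq, h256, hex, ← mul_assoc,
        Int.add_mul_ediv_right _ _ (by norm_num : (256:Int) ≠ 0)]
    rw [hband, hshr]

lemma pv_acc_snd (cs : List Char) (st : Int × Nat) :
    (cs.foldl pvAccStep st).2 = st.2 + cs.length := by
  induction cs generalizing st with
  | nil => simp
  | cons c cs ih => simp [pvAccStep, ih]; omega

lemma pv_acc_append (cs : List Char) (c : Char) :
    pvAcc (cs ++ [c]) = PySem.Int.bor (pvAcc cs) (pvIdx c <<< (5 * cs.length)) := by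
  unfold pvAcc
  rw [List.foldl_append]
  have h2 : (cs.foldl pvAccStep (0, 0)).2 = cs.length := by
    have := pv_acc_snd cs (0, 0); omega
  simp [pvAccStep, h2]

lemma pv_main_inv (cs : List Char) :
    cs.foldl pvStepA ([], 0, 0)
      = ((pvPeelN (5 * cs.length / 8) (pvAcc cs)).1,
         (pvPeelN (5 * cs.length / 8) (pvAcc cs)).2,
         5 * cs.length % 8)
    ∧ -((2:Int) ^ (5 * cs.length)) ≤ pvAcc cs ∧ pvAcc cs < (2:Int) ^ (5 * cs.length) := by
  induction cs using List.reverseRecOn with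
  | nil => refine ⟨?_, by norm_num [pvAcc], by norm_num [pvAcc]⟩; simp [pvAcc, pvPeelN]
  | append_singleton cs c ih =>
    obtain ⟨hA, hlo, hhi⟩ := ih
    have hdm := Nat.div_add_mod (5 * cs.length) 8
    have hrlt : 5 * cs.length % 8 < 8 := Nat.mod_lt _ (by norm_num)
    have hlen1 : (cs ++ [c]).length = cs.length + 1 := by simp
    have hE : (0:Int) < 2 ^ (5 * cs.length) := pow_pos (by norm_num) _
    have hE5 : ((2:Int) ^ (5 * (cs.length + 1))) = 32 * 2 ^ (5 * cs.length) := by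
      rw [show 5 * (cs.length + 1) = 5 * cs.length + 5 from by omega, pow_add]; ring
    have hv1 : -1 ≤ pvIdx c := pv_idx_lb c
    have hv2 : pvIdx c < 32 := pv_idx_ub c
    have happ : pvAcc (cs ++ [c]) = PySem.Int.bor (pvAcc cs) (pvIdx c <<< (5 * cs.length)) :=
      pv_acc_append cs c
    have hfold : (cs ++ [c]).foldl pvStepA ([], 0, 0) = pvStepA (cs.foldl pvStepA ([], 0, 0)) c := by
      rw [List.foldl_append]; rfl
    have hS : (pvPeelN (5 * cs.length / 8) (pvAcc cs)).2
        = pvAcc cs / 2 ^ (8 * (5 * cs.length / 8)) := pv_peel_snd _ _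
    have hpow_split : ((2:Int) ^ (5 * cs.length))
        = 2 ^ (5 * cs.length % 8) * 2 ^ (8 * (5 * cs.length / 8)) := by
      rw [← pow_add]; congr 1; omega
    rcases le_or_gt 0 (pvAcc cs) with hpos | hneg
    · -- accumulator still nonnegative: OR is addition of the shifted group
      have hSnn : 0 ≤ (pvPeelN (5 * cs.length / 8) (pvAcc cs)).2 := by
        rw [hS]; exact Int.ediv_nonneg hpos (by positivity)
      have hSlt : (pvPeelN (5 * cs.length / 8) (pvAcc cs)).2 < 2 ^ (5 * cs.length % 8) := by
        rw [hS]
        exact Int.ediv_lt_of_lt_mul (by positivity) (by rw [← hpow_split]; exact hhi)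
      have hborS : PySem.Int.bor (pvPeelN (5 * cs.length / 8) (pvAcc cs)).2
            (pvIdx c <<< (5 * cs.length % 8))
          = (pvPeelN (5 * cs.length / 8) (pvAcc cs)).2 + pvIdx c * 2 ^ (5 * cs.length % 8) :=
        pv_bor_pos _ _ _ hSnn hSlt hv1
      have hacc' : pvAcc (cs ++ [c]) = pvAcc cs + pvIdx c * 2 ^ (5 * cs.length) := by
        rw [happ, pv_bor_pos _ _ _ hpos hhi hv1]
      have hstable := pv_peel_stable (5 * cs.length / 8) (pvAcc cs) (pvIdx c) (5 * cs.length)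
        (by omega)
      rw [show 5 * cs.length - 8 * (5 * cs.length / 8) = 5 * cs.length % 8 from by omega] at hstable
      have hpeel_new : pvPeelN (5 * cs.length / 8) (pvAcc (cs ++ [c]))
          = ((pvPeelN (5 * cs.length / 8) (pvAcc cs)).1,
             (pvPeelN (5 * cs.length / 8) (pvAcc cs)).2 + pvIdx c * 2 ^ (5 * cs.length % 8)) := by
        rw [hacc']; exact hstable
      have hm1 : (-1) * 2 ^ (5 * cs.length) ≤ pvIdx c * 2 ^ (5 * cs.length) :=
        mul_le_mul_of_nonneg_right hv1 hE.le
      have h31 : pvIdx c * 2 ^ (5 * cs.length) ≤ 31 * 2 ^ (5 * cs.length) :=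
        mul_le_mul_of_nonneg_right (by omega) hE.le
      refine ⟨?_, by rw [hacc', hlen1, hE5]; linarith, by rw [hacc', hlen1, hE5]; linarith⟩
      by_cases hbits : 8 ≤ 5 * cs.length % 8 + 5
      · have hnb' : 5 * (cs.length + 1) / 8 = 5 * cs.length / 8 + 1 := by omega
        have hr' : 5 * (cs.length + 1) % 8 = 5 * cs.length % 8 + 5 - 8 := by omega
        rw [hfold, hA, hlen1, hnb', hr', pv_peel_succ, hpeel_new]
        simp only [pvStepA, hborS]
        rw [if_pos hbits]
      · have hnb' : 5 * (cs.length + 1) / 8 = 5 * cs.length / 8 := by omega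
        have hr' : 5 * (cs.length + 1) % 8 = 5 * cs.length % 8 + 5 := by omega
        rw [hfold, hA, hlen1, hnb', hr', hpeel_new]
        simp only [pvStepA, hborS]
        rw [if_neg hbits]
    · -- accumulator already negative: the OR is absorbed
      have hSneg : (pvPeelN (5 * cs.length / 8) (pvAcc cs)).2 < 0 := by
        rw [hS]
        by_contra hcon
        have hcon' : (0:Int) ≤ pvAcc cs / 2 ^ (8 * (5 * cs.length / 8)) := not_lt.mp hcon
        have h3 := Int.mul_ediv_add_emod (pvAcc cs) (2 ^ (8 * (5 * cs.length / 8)))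
        have h1 := Int.emod_nonneg (pvAcc cs)
          (show ((2:Int) ^ (8 * (5 * cs.length / 8))) ≠ 0 from by positivity)
        have h4 : (0:Int) ≤ 2 ^ (8 * (5 * cs.length / 8))
            * (pvAcc cs / 2 ^ (8 * (5 * cs.length / 8))) := mul_nonneg (by positivity) hcon'
        linarith
      have hSlb : -((2:Int) ^ (5 * cs.length % 8)) ≤ (pvPeelN (5 * cs.length / 8) (pvAcc cs)).2 := by
        rw [hS]
        have hmono : -((2:Int) ^ (5 * cs.length)) / 2 ^ (8 * (5 * cs.length / 8))
            ≤ pvAcc cs / 2 ^ (8 * (5 * cs.length / 8)) := Int.ediv_le_ediv (by positivity) hlo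
        have hcalc : -((2:Int) ^ (5 * cs.length)) / 2 ^ (8 * (5 * cs.length / 8))
            = -((2:Int) ^ (5 * cs.length % 8)) := by
          rw [hpow_split,
            show -((2:Int) ^ (5 * cs.length % 8) * 2 ^ (8 * (5 * cs.length / 8)))
              = (-((2:Int) ^ (5 * cs.length % 8))) * 2 ^ (8 * (5 * cs.length / 8)) from by ring,
            Int.mul_ediv_cancel _ (by positivity : (0:Int) < 2 ^ (8 * (5 * cs.length / 8))).ne']
        rw [← hcalc]
        exact hmono
      have hborS : PySem.Int.bor (pvPeelN (5 * cs.length / 8) (pvAcc cs)).2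
            (pvIdx c <<< (5 * cs.length % 8))
          = (pvPeelN (5 * cs.length / 8) (pvAcc cs)).2 := pv_bor_neg _ _ _ hSneg hSlb hv1
      have hacc' : pvAcc (cs ++ [c]) = pvAcc cs := by
        rw [happ, pv_bor_neg _ _ _ hneg hlo hv1]
      refine ⟨?_, by rw [hacc', hlen1, hE5]; linarith, by rw [hacc', hlen1, hE5]; linarith⟩
      by_cases hbits : 8 ≤ 5 * cs.length % 8 + 5
      · have hnb' : 5 * (cs.length + 1) / 8 = 5 * cs.length / 8 + 1 := by omega
        have hr' : 5 * (cs.length + 1) % 8 = 5 * cs.length % 8 + 5 - 8 := by omega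
        rw [hfold, hA, hlen1, hnb', hr', pv_peel_succ, hacc']
        simp only [pvStepA, hborS]
        rw [if_pos hbits]
      · have hnb' : 5 * (cs.length + 1) / 8 = 5 * cs.length / 8 := by omega
        have hr' : 5 * (cs.length + 1) % 8 = 5 * cs.length % 8 + 5 := by omega
        rw [hfold, hA, hlen1, hnb', hr', hacc']
        simp only [pvStepA, hborS]
        rw [if_neg hbits]

lemma pv_ports_eq (s : String) : decode_guid s = decode_guid_alt s := by
  obtain ⟨hA, -, -⟩ := pv_main_inv s.toList
  have hA' : s.toList.foldl pvStepA ([], 0, 0)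
      = (((List.range (5 * s.toList.length / 8)).foldl pvPeelStep
            ([], (s.toList.foldl pvAccStep (0, 0)).1)).1,
         ((List.range (5 * s.toList.length / 8)).foldl pvPeelStep
            ([], (s.toList.foldl pvAccStep (0, 0)).1)).2,
         5 * s.toList.length % 8) := hA
  simp only [decode_guid, decode_guid_alt, pvB32, hA']
  rw [PySem.List.foldl_append_eq_flatMap]
  simp [List.flatMap_def]

-- ===== VERDICT (by name: the statement is the Claim_ definition above) =====
theorem decode_guid_spec : Claim_equal_decode_guid := by
  intro input_string _ _
  show decode_guid input_string = decode_guid_alt input_string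
  exact pv_ports_eq input_string
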